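-- pv_equiv track=rewrite | github.com/krzyszu1996/PSI-20-21 | zad1.py | sklej1
-- ===== SOURCE A (Python) =====
-- def sklej1(a_list, b_list):
--     if len(a_list) != len(b_list):
--         return "Listy nie są takiej samej długości!"
--     else:
--         suma = list()
--         for i in range(len(a_list)):
--             if i % 2 == 0:
--                 suma.append(a_list[i])
--             else:
--                 suma.append(b_list[i])
--         return suma
-- ===== SOURCE B (Python) =====
-- def sklej1(a_list, b_list):
--     if len(a_list) != len(b_list):
--         return "Listy nie są takiej samej długości!"
--     suma = list(b_list)
--     suma[::2] = a_list[::2]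
--     return suma
-- ===== Notes on version B (the rewrite author's own statement) =====
-- stated objective: idiomatic
-- what changed: Replaces the per-index parity branch loop with a copy of b_list and one strided slice assignment suma[::2] = a_list[::2] overwriting the even positions from a_list.
import Mathlib
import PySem

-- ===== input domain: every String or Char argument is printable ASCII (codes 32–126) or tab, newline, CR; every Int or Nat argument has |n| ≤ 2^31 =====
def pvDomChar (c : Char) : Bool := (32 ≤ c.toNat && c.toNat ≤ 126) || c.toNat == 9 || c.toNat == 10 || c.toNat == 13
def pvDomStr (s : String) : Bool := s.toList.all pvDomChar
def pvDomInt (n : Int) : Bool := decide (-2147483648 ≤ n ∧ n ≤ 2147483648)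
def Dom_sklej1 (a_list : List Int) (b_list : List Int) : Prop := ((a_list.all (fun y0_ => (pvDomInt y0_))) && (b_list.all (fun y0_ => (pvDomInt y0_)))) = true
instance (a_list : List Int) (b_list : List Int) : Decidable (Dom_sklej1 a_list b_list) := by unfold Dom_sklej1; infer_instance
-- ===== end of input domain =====

-- B replaces A's per-index parity-branch loop with a copy of b_list whose even positions
-- are overwritten by the strided slice a_list[::2] (idiomatic; return value only).

-- ===== PORT A =====
-- loop 'for i in range(len(a_list)):' with the parity branch; indices are always in range,
-- so a_list[i] / b_list[i] are ported as getD (exact here).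
def sklej1 (a_list : List Int) (b_list : List Int) : List Int :=
  if a_list.length ≠ b_list.length then []
    -- Python returns the string "Listy nie są takiej samej długości!" here (not a List Int);
    -- excluded by Pre_sklej1, [] is a placeholder.
  else
    (List.range a_list.length).foldl
      (fun suma i =>
        if i % 2 = 0 then suma ++ [a_list.getD i 0] else suma ++ [b_list.getD i 0]) []

-- ===== PORT B =====
-- a_list[::2] : the elements at even indices
def every2 : List Int → List Int
  | [] => []
  | [x] => [x]
  | x :: _ :: xs => x :: every2 xs

-- 'suma[::2] = evens' on suma = copy of b_list: overwrite positions 0,2,4,… with evens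
def assign2 : List Int → List Int → List Int
  | [], _ => []
  | bs, [] => bs
  | [_], e :: _ => [e]
  | _ :: b1 :: bs, e :: es => e :: b1 :: assign2 bs es

def sklej1_alt (a_list : List Int) (b_list : List Int) : List Int :=
  if a_list.length ≠ b_list.length then []
    -- Python returns the string "Listy nie są takiej samej długości!" here (not a List Int);
    -- excluded by Pre_sklej1, [] is a placeholder.
  else
    assign2 b_list (every2 a_list)

-- ===== PRECONDITION & SPEC =====
-- Pre_ excludes unequal lengths: there both Pythons return a STRING, not a value of the
-- declared list type.
def Pre_sklej1 (a_list : List Int) (b_list : List Int) : Prop :=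
  a_list.length = b_list.length
instance (a_list : List Int) (b_list : List Int) : Decidable (Pre_sklej1 a_list b_list) := by
  unfold Pre_sklej1; infer_instance

def pvWitness_sklej1 : List Int × List Int := ([1, 2, 3], [4, 5, 6])

def Spec_sklej1 (a_list : List Int) (b_list : List Int) (out : List Int) : Prop := out = sklej1_alt a_list b_list
instance (a_list : List Int) (b_list : List Int) (out : List Int) : Decidable (Spec_sklej1 a_list b_list out) := by unfold Spec_sklej1; infer_instance

-- ===== CLAIM (what is proved, stated in full; the proofs are below) =====
def Claim_equal_sklej1 : Prop := ∀ (a_list : List Int) (b_list : List Int), Dom_sklej1 a_list b_list → Pre_sklej1 a_list b_list → Spec_sklej1 a_list b_list (sklej1 a_list b_list)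

-- ===== LEMMAS AND PROOFS =====

-- A's loop as a map over the index range
theorem sklej1_loop_eq_map (a_list b_list : List Int) :
    (List.range a_list.length).foldl
      (fun suma i =>
        if i % 2 = 0 then suma ++ [a_list.getD i 0] else suma ++ [b_list.getD i 0]) []
    = (List.range a_list.length).map
        (fun i => if i % 2 = 0 then a_list.getD i 0 else b_list.getD i 0) := by
  have h : ∀ (l : List Nat) (acc : List Int),
      l.foldl (fun suma i =>
        if i % 2 = 0 then suma ++ [a_list.getD i 0] else suma ++ [b_list.getD i 0]) acc
      = acc ++ l.map (fun i => if i % 2 = 0 then a_list.getD i 0 else b_list.getD i 0) := by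
    intro l
    induction l with
    | nil => simp
    | cons x xs ih =>
        intro acc
        simp only [List.foldl_cons]
        split <;> rw [ih] <;> simp <;> exact fun hc => absurd hc (by omega)
  simpa using h (List.range a_list.length) []

-- B's slice assignment equals the same map, for equal lengths
theorem assign2_every2_eq_map (a_list : List Int) :
    ∀ b_list : List Int, a_list.length = b_list.length →
    assign2 b_list (every2 a_list)
    = (List.range a_list.length).map
        (fun i => if i % 2 = 0 then a_list.getD i 0 else b_list.getD i 0) := by
  induction a_list using every2.induct with
  | case1 =>
    intro b hb
    obtain rfl : b = [] := List.eq_nil_of_length_eq_zero hb.symm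
    simp [assign2]
  | case2 x =>
    intro b hb
    obtain ⟨u, rfl⟩ : ∃ u, b = [u] := by
      cases b with
      | nil => simp at hb
      | cons u t =>
        cases t with
        | nil => exact ⟨u, rfl⟩
        | cons _ _ => simp at hb
    simp [List.range_succ]
    rfl
  | case3 x y xs ih =>
    intro b hb
    obtain ⟨u, v, bs, rfl⟩ : ∃ u v bs, b = u :: v :: bs := by
      cases b with
      | nil => simp at hb
      | cons u t =>
        cases t with
        | nil => simp at hb
        | cons v bs => exact ⟨u, v, bs, rfl⟩
    have hlen : xs.length = bs.length := by
      simpa using hb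
    have hrange : ∀ (f : Nat → Int),
        (List.range (xs.length + 1 + 1)).map f
        = f 0 :: f 1 :: (List.range xs.length).map (fun i => f (i + 2)) := by
      intro f
      rw [show xs.length + 1 + 1 = 2 + xs.length by omega, List.range_add]
      simp [List.range_succ]
      exact fun a _ => congrArg f (Nat.add_comm 2 a)
    show x :: v :: assign2 bs (every2 xs) = _
    rw [show (x :: y :: xs).length = xs.length + 1 + 1 by simp, hrange]
    simp only [List.cons.injEq]
    refine ⟨by simp, by simp, ?_⟩
    rw [ih bs hlen]
    apply List.map_congr_left
    intro i _
    have hpar : (i + 2) % 2 = i % 2 := by omega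
    by_cases hi : i % 2 = 0 <;> simp [hpar, hi]

-- ===== VERDICT (by name: the statement is the Claim_ definition above) =====
theorem sklej1_spec : Claim_equal_sklej1 := by
  intro a b _ hpre
  unfold Spec_sklej1 sklej1 sklej1_alt
  rw [if_neg (by simpa [Pre_sklej1] using hpre), if_neg (by simpa [Pre_sklej1] using hpre)]
  rw [sklej1_loop_eq_map, assign2_every2_eq_map a b hpre]
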